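-- pv_equiv track=rewrite | github.com/vineetbansal/dsprint | scripts/9.Features_exploration/windowed_features.py | calc_relevant_idx
-- ===== SOURCE A (Python) =====
-- def calc_relevant_idx(pos_idx, window_size, max_idx):
--     "Calculate the relevant domain positions for the window size"
--
--     idx_list = [pos_idx]
--
--     for i in range(1, window_size + 1):
--
--         if ((pos_idx - i) > 0):
--             idx_list.append(pos_idx - i)
--         if ((pos_idx + i) <= max_idx):
--             idx_list.append(pos_idx + i)
--
--     idx_list.sort()
--     return idx_list
-- ===== SOURCE B (Python) =====
-- def calc_relevant_idx(pos_idx, window_size, max_idx):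
--     "Calculate the relevant domain positions for the window size"
--     lo = max(1, pos_idx - window_size)
--     hi = min(max_idx, pos_idx + window_size)
--     return list(range(lo, pos_idx)) + [pos_idx] + list(range(pos_idx + 1, hi + 1))
-- ===== Notes on version B (the rewrite author's own statement) =====
-- stated objective: simpler
-- what changed: Replaces the append-in-a-loop-then-sort construction with a closed-form clipped range: two range() calls around pos_idx, already in sorted order, no loop and no sort.
import Mathlib
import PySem

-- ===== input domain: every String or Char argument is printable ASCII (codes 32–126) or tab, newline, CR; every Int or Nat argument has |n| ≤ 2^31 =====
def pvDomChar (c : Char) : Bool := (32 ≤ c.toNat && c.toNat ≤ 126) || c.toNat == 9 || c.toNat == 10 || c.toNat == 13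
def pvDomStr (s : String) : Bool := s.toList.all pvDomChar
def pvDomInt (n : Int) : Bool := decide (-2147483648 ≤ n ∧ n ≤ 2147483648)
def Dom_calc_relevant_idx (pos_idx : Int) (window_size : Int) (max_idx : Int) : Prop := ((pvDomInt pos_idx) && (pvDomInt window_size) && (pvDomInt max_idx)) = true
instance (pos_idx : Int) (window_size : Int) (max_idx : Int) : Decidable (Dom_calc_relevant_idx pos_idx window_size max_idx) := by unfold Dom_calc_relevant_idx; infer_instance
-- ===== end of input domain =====

-- B replaces A's append-in-a-loop-then-sort with a closed-form clipped range
-- (two ranges around pos_idx, already in order); objective: simpler.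

-- ===== PORT A =====
-- the body of A's for-loop (idx_list reassigned in place, as in the Python)
def pvStepA (pos_idx max_idx : Int) (acc : List Int) (i : Int) : List Int :=
  let acc := if pos_idx - i > 0 then acc ++ [pos_idx - i] else acc
  if pos_idx + i ≤ max_idx then acc ++ [pos_idx + i] else acc

def calc_relevant_idx (pos_idx : Int) (window_size : Int) (max_idx : Int) : List Int :=
  let idx_list : List Int := [pos_idx]
  let idx_list := (PySem.List.pyRange 1 (window_size + 1) 1).foldl (pvStepA pos_idx max_idx) idx_list
  PySem.List.sorted idx_list (fun x => x) false

-- ===== PORT B =====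
def calc_relevant_idx_alt (pos_idx : Int) (window_size : Int) (max_idx : Int) : List Int :=
  PySem.List.pyRange (max 1 (pos_idx - window_size)) pos_idx 1
    ++ [pos_idx]
    ++ PySem.List.pyRange (pos_idx + 1) (min max_idx (pos_idx + window_size) + 1) 1

-- ===== PRECONDITION & SPEC =====
def Spec_calc_relevant_idx (pos_idx : Int) (window_size : Int) (max_idx : Int) (out : List Int) : Prop := out = calc_relevant_idx_alt pos_idx window_size max_idx
instance (pos_idx : Int) (window_size : Int) (max_idx : Int) (out : List Int) : Decidable (Spec_calc_relevant_idx pos_idx window_size max_idx out) := by unfold Spec_calc_relevant_idx; infer_instance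

-- ===== CLAIM (what is proved, stated in full; the proofs are below) =====
def Claim_equal_calc_relevant_idx : Prop := ∀ (pos_idx : Int) (window_size : Int) (max_idx : Int), Dom_calc_relevant_idx pos_idx window_size max_idx → Spec_calc_relevant_idx pos_idx window_size max_idx (calc_relevant_idx pos_idx window_size max_idx)

-- ===== LEMMAS AND PROOFS =====

-- one loop step appends an optional lower and an optional upper element
theorem pvStepA_eq (pos mx : Int) (acc : List Int) (i : Int) :
    pvStepA pos mx acc i
      = acc ++ (if pos - i > 0 then [pos - i] else [])
            ++ (if pos + i ≤ mx then [pos + i] else []) := by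
  unfold pvStepA
  split_ifs <;> simp

-- shuffle: the new lower element moves to the front, the new upper element stays at the back
theorem pv_shuffle (l u L U : List Int) (p : Int) :
    ((l ++ [p] ++ u) ++ L ++ U).Perm ((L ++ l) ++ [p] ++ (u ++ U)) := by
  have h1 : ((l ++ [p] ++ u) ++ L).Perm (L ++ (l ++ [p] ++ u)) := List.perm_append_comm
  refine (h1.append_right U).trans ?_
  simp [List.append_assoc]

-- B's output with window n, as a function of n (the loop invariant's right-hand side)
def pvRhs (pos mx : Int) (n : Int) : List Int :=
  PySem.List.pyRange (max 1 (pos - n)) pos 1 ++ [pos]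
    ++ PySem.List.pyRange (pos + 1) (min mx (pos + n) + 1) 1

-- A's pre-sort accumulator after window n is a permutation of B's output
theorem pv_perm (pos mx : Int) (n : Nat) :
    ((PySem.List.pyRange 1 ((n : Int) + 1) 1).foldl (pvStepA pos mx) [pos]).Perm
      (pvRhs pos mx (n : Int)) := by
  induction n with
  | zero =>
    rw [PySem.List.pyRange_one_eq_nil (by omega)]
    simp only [List.foldl_nil, pvRhs, Nat.cast_zero]
    rw [PySem.List.pyRange_one_eq_nil (by omega), PySem.List.pyRange_one_eq_nil (by omega)]
    simp
  | succ n ih =>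
    have hc : (((n + 1 : Nat)) : Int) = (n : Int) + 1 := by push_cast; ring
    rw [hc]
    have hsplit : PySem.List.pyRange 1 (((n : Int) + 1) + 1) 1
        = PySem.List.pyRange 1 ((n : Int) + 1) 1 ++ [(n : Int) + 1] :=
      PySem.List.pyRange_one_succ_right (by omega)
    rw [hsplit, List.foldl_append]
    simp only [List.foldl_cons, List.foldl_nil]
    rw [pvStepA_eq]
    have step1 : ((((PySem.List.pyRange 1 ((n : Int) + 1) 1).foldl (pvStepA pos mx) [pos]))
        ++ (if pos - ((n : Int) + 1) > 0 then [pos - ((n : Int) + 1)] else [])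
        ++ (if pos + ((n : Int) + 1) ≤ mx then [pos + ((n : Int) + 1)] else [])).Perm
        ((pvRhs pos mx (n : Int))
        ++ (if pos - ((n : Int) + 1) > 0 then [pos - ((n : Int) + 1)] else [])
        ++ (if pos + ((n : Int) + 1) ≤ mx then [pos + ((n : Int) + 1)] else [])) :=
      (ih.append_right _).append_right _
    refine step1.trans ?_
    unfold pvRhs
    refine (pv_shuffle _ _ _ _ _).trans ?_
    have hlow : (if pos - ((n : Int) + 1) > 0 then [pos - ((n : Int) + 1)] else [])
        ++ PySem.List.pyRange (max 1 (pos - (n : Int))) pos 1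
        = PySem.List.pyRange (max 1 (pos - ((n : Int) + 1))) pos 1 := by
      by_cases h : pos - ((n : Int) + 1) > 0
      · rw [if_pos h]
        have h1 : max 1 (pos - ((n : Int) + 1)) = pos - ((n : Int) + 1) := by omega
        have h2 : max 1 (pos - (n : Int)) = pos - ((n : Int) + 1) + 1 := by omega
        rw [h1, h2, List.singleton_append]
        exact (PySem.List.pyRange_one_cons (by omega)).symm
      · rw [if_neg h, List.nil_append]
        have h1 : max 1 (pos - (n : Int)) = max 1 (pos - ((n : Int) + 1)) := by omega
        rw [h1]
    have hup : PySem.List.pyRange (pos + 1) (min mx (pos + (n : Int)) + 1) 1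
        ++ (if pos + ((n : Int) + 1) ≤ mx then [pos + ((n : Int) + 1)] else [])
        = PySem.List.pyRange (pos + 1) (min mx (pos + ((n : Int) + 1)) + 1) 1 := by
      by_cases h : pos + ((n : Int) + 1) ≤ mx
      · rw [if_pos h]
        have h2 : min mx (pos + (n : Int)) + 1 = pos + ((n : Int) + 1) := by omega
        have h1 : min mx (pos + ((n : Int) + 1)) + 1 = pos + ((n : Int) + 1) + 1 := by omega
        rw [h2, h1]
        exact (PySem.List.pyRange_one_succ_right (by omega)).symm
      · rw [if_neg h, List.append_nil]
        have h1 : min mx (pos + (n : Int)) = min mx (pos + ((n : Int) + 1)) := by omega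
        rw [h1]
    rw [hlow, hup]

-- B's output is strictly increasing
theorem pv_sorted (pos ws mx : Int) :
    (calc_relevant_idx_alt pos ws mx).Pairwise (fun a b => a < b) := by
  unfold calc_relevant_idx_alt
  rw [List.pairwise_append, List.pairwise_append]
  refine ⟨⟨PySem.List.pairwise_lt_pyRange_one _ _, List.pairwise_singleton _ _, ?_⟩,
    PySem.List.pairwise_lt_pyRange_one _ _, ?_⟩
  · intro a ha b hb
    rw [PySem.List.mem_pyRange_one] at ha
    simp only [List.mem_singleton] at hb
    omega
  · intro a ha b hb
    simp only [List.mem_append, List.mem_singleton, PySem.List.mem_pyRange_one] at ha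
    rw [PySem.List.mem_pyRange_one] at hb
    rcases ha with h | h <;> omega

-- ===== VERDICT (by name: the statement is the Claim_ definition above) =====
theorem calc_relevant_idx_spec : Claim_equal_calc_relevant_idx := by
  intro pos ws mx _
  unfold Spec_calc_relevant_idx calc_relevant_idx
  by_cases hws : ws ≤ 0
  · rw [PySem.List.pyRange_one_eq_nil (by omega)]
    simp only [List.foldl_nil]
    unfold calc_relevant_idx_alt
    rw [PySem.List.pyRange_one_eq_nil (by omega), PySem.List.pyRange_one_eq_nil (by omega)]
    simp only [List.nil_append, List.append_nil]
    exact PySem.List.sorted_eq_self_of_pairwise _ _ (List.pairwise_singleton _ _)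
  · have hn : ws = ((ws.toNat : Int)) := by omega
    have hperm := pv_perm pos mx ws.toNat
    rw [← hn] at hperm
    have hrhs : pvRhs pos mx ws = calc_relevant_idx_alt pos ws mx := rfl
    rw [hrhs] at hperm
    exact PySem.List.sorted_eq_of_perm_of_pairwise_lt _ _ _ hperm.symm (pv_sorted pos ws mx)
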